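-- pv_equiv track=rewrite | github.com/0/srat-solver | srat_verify.py | works_13
-- ===== SOURCE A (Python) =====
-- A = ord('A')
--
-- def works_13(ans):
-- 	"""13. The only odd-numbered problem with answer A is
-- 	(A) 9 (B) 11 (C) 13 (D) 15 (E) 17
--
-- 	>>> works_13('BBBBBBBBBBBBA')
-- 	False
-- 	>>> works_13('BABBBBBBBBBBA')
-- 	False
-- 	>>> works_13('BBBBBBBBBBABB')
-- 	True
-- 	"""
-- 	x = ans[12]
-- 	foo = (ord(x) - A + 4) * 2
--
-- 	for i in range(len(ans)):
-- 		if i % 2 != 0: continue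
--
-- 		if ans[i] == 'A':
-- 			if i != foo:
-- 				return False
-- 		else:
-- 			if i == foo:
-- 				return False
--
-- 	return True
-- ===== SOURCE B (Python) =====
-- def works_13(ans):
--     foo = (ord(ans[12]) - ord('A') + 4) * 2
--     c = sum(ch == 'A' for ch in ans[::2])
--     if 0 <= foo < len(ans):
--         return ans[foo] == 'A' and c == 1
--     return c == 0
-- ===== Notes on version B (the rewrite author's own statement) =====
-- stated objective: alternative
-- what changed: B replaces A's per-index early-return loop (which tests a biconditional at every even position) with a staged computation: slice out the even-position characters with ans[::2], count the 'A's among them, then decide by one direct lookup ans[foo]=='A' together with c==1 when foo is in range, or c==0 otherwise.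
-- outside the precondition, e.g. on works_13('A'): A raises IndexError, B raises IndexError
import Mathlib
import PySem

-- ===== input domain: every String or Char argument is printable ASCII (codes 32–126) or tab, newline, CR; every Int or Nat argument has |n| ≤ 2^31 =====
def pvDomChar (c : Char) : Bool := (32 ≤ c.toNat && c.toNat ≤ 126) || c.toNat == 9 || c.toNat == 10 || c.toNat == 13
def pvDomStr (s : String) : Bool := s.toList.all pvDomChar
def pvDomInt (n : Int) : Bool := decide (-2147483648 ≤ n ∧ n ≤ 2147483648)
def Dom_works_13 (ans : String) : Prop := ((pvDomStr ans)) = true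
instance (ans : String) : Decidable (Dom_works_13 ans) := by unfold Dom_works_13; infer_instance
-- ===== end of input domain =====

-- B replaces A's per-index early-return loop by a staged computation: slice the even-position
-- characters, count the 'A's among them, and decide by one direct lookup (objective: alternative).

-- ===== PORT A =====
-- A's for-loop with early returns, recursing over the index list in the same order.
def works13Loop (s : List Char) (foo : Int) : List Int → Bool
  | [] => true
  | i :: rest =>
    if i % 2 ≠ 0 then works13Loop s foo rest
    else if PySem.List.pyGet? s i = some 'A' then
      if i ≠ foo then false else works13Loop s foo rest
    else
      if i = foo then false else works13Loop s foo rest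

def works_13 (ans : String) : Bool :=
  match PySem.Str.pyGet? ans 12 with
  | none => false  -- ans[12] raises IndexError in Python; excluded by Pre_
  | some x =>
    let foo : Int := ((x.toNat : Int) - 65 + 4) * 2
    works13Loop ans.toList foo (PySem.List.pyRange 0 ans.toList.length 1)

-- ===== PORT B =====
def works_13_alt (ans : String) : Bool :=
  match PySem.Str.pyGet? ans 12 with
  | none => false  -- ans[12] raises IndexError in Python; excluded by Pre_
  | some x =>
    let foo : Int := ((x.toNat : Int) - 65 + 4) * 2
    -- c = sum(ch == 'A' for ch in ans[::2]); ans[::2] never raises (step ≠ 0), so getD [] is exact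
    let evens : List Char := (PySem.List.slice? ans.toList none none 2).getD []
    let c : Int := evens.foldl (fun acc ch => if ch == 'A' then acc + 1 else acc) 0
    if 0 ≤ foo ∧ foo < (ans.toList.length : Int) then
      decide (PySem.Str.pyGet? ans foo = some 'A') && (c == 1)
    else c == 0

-- ===== PRECONDITION & SPEC =====
-- Pre_ excludes strings shorter than 13, on which ans[12] raises IndexError in both programs.
def Pre_works_13 (ans : String) : Prop := 13 ≤ ans.toList.length
instance (ans : String) : Decidable (Pre_works_13 ans) := by unfold Pre_works_13; infer_instance
def pvWitness_works_13 : String := ("BBBBBBBBBBABB")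

def Spec_works_13 (ans : String) (out : Bool) : Prop := out = works_13_alt ans
instance (ans : String) (out : Bool) : Decidable (Spec_works_13 ans out) := by unfold Spec_works_13; infer_instance

-- ===== CLAIM (what is proved, stated in full; the proofs are below) =====
def Claim_equal_works_13 : Prop := ∀ (ans : String), Dom_works_13 ans → Pre_works_13 ans → Spec_works_13 ans (works_13 ans)

-- ===== LEMMAS AND PROOFS =====

-- A's loop decides the per-index biconditional over the remaining indices.
theorem works13Loop_eq (s : List Char) (foo : Int) (is : List Int) :
    works13Loop s foo is =
      decide (∀ i ∈ is, i % 2 = 0 →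
        (PySem.List.pyGet? s i = some 'A' ↔ i = foo)) := by
  induction is with
  | nil => simp [works13Loop]
  | cons i rest ih =>
    simp only [works13Loop]
    by_cases hmod : i % 2 = 0
    · by_cases hA : PySem.List.pyGet? s i = some 'A'
      · by_cases hfoo : i = foo <;> simp_all
      · by_cases hfoo : i = foo <;> simp_all
    · simp_all

-- xs[::2] is the list of the elements at the even indices 2*k, k < ⌈n/2⌉.
theorem slice?_step_two (s : List Char) :
    PySem.List.slice? s none none 2 =
      some ((List.range ((s.length + 1) / 2)).filterMap (fun k => s[2 * k]?)) := by
  simp only [PySem.List.slice?, PySem.List.sliceIndices]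
  norm_num
  have h1 : (if 0 < s.length then (((s.length : Int) + 2 - 1) / 2).toNat else 0)
      = (s.length + 1) / 2 := by
    split_ifs with h <;> omega
  rw [h1]
  apply List.filterMap_congr
  intro k _
  have : (2 * (k : Int)).toNat = 2 * k := by omega
  rw [this]

-- counting a value in a filterMap image counts the preimages that hit it
theorem count_filterMap_some {α : Type} [DecidableEq α] (f : ℕ → Option α) (a : α) (l : List ℕ) :
    ((l.filterMap f).count a) = l.countP (fun k => f k = some a) := by
  induction l with
  | nil => rfl
  | cons x xs ih =>
    cases hf : f x with
    | none => simp [hf, ih]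
    | some y =>
      by_cases hy : y = a
      · simp [hf, ih, hy]
      · simp only [List.filterMap_cons, hf, List.countP_cons, List.count_cons, ih]
        simp [hy]

-- countP over a range is 1 iff the known hit k0 is the only hit
theorem countP_range_one (m k0 : ℕ) (p : ℕ → Bool) (hk : k0 < m) (hp : p k0 = true) :
    ((List.range m).countP p = 1) ↔ ∀ k < m, p k = true → k = k0 := by
  constructor
  · intro h1 k hkm hpk
    by_contra hne
    have hnd : ((List.range m).filter p).Nodup := (List.nodup_range).filter p
    have hs : ({k0, k} : Finset ℕ) ⊆ ((List.range m).filter p).toFinset := by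
      intro z hz
      simp only [Finset.mem_insert, Finset.mem_singleton] at hz
      rcases hz with rfl | rfl <;>
        simp [List.mem_range, hk, hkm, hp, hpk]
    have hcard : ({k0, k} : Finset ℕ).card = 2 := Finset.card_pair (fun h => hne h.symm)
    have hle := Finset.card_le_card hs
    rw [hcard, List.toFinset_card_of_nodup hnd] at hle
    rw [List.countP_eq_length_filter] at h1
    omega
  · intro h
    have hc : (List.range m).countP p = (List.range m).countP (fun k => k == k0) := by
      apply List.countP_congr
      intro k hkm
      rw [List.mem_range] at hkm
      by_cases hkk : k = k0
      · simp [hkk, hp]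
      · simp only [beq_iff_eq, hkk]
        by_cases hpk : p k = true
        · exact absurd (h k hkm hpk) hkk
        · simp [hpk]
    rw [hc, show (List.range m).countP (fun k => k == k0) = (List.range m).count k0 from rfl,
      List.count_eq_one_of_mem List.nodup_range (by simpa using hk)]

-- ===== VERDICT (by name: the statement is the Claim_ definition above) =====
theorem works_13_spec : Claim_equal_works_13 := by
  intro ans _ hpre
  unfold Pre_works_13 at hpre
  unfold Spec_works_13 works_13 works_13_alt
  cases hx : PySem.Str.pyGet? ans 12 with
  | none =>
    exfalso
    rw [show (12 : Int) = ((12 : ℕ) : Int) from rfl, PySem.Str.pyGet?_natCast] at hx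
    have := List.getElem?_eq_none_iff.mp hx
    omega
  | some x =>
    simp only
    set s := ans.toList with hs
    set foo : Int := ((x.toNat : Int) - 65 + 4) * 2 with hfoo
    set n : ℕ := s.length with hn
    set m : ℕ := (n + 1) / 2 with hm
    rw [works13Loop_eq, slice?_step_two]
    simp only [Option.getD_some, PySem.List.foldl_beq_add_one, count_filterMap_some, zero_add,
      ← hn, ← hm]
    set p : ℕ → Bool := fun k => decide (s[2 * k]? = some 'A') with hp
    -- A's per-even-index condition, reindexed over k < m with i = 2*k
    have hA : (∀ i ∈ PySem.List.pyRange 0 (n : Int) 1, i % 2 = 0 →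
        (PySem.List.pyGet? s i = some 'A' ↔ i = foo)) ↔
        (∀ k < m, (p k = true ↔ (2 * k : Int) = foo)) := by
      constructor
      · intro h k hkm
        have hlt : 2 * k < n := by omega
        have h2 := h ((2 * k : ℕ) : Int)
          (by rw [PySem.List.mem_pyRange_one]; constructor <;> [positivity; exact_mod_cast hlt])
          (by omega)
        rw [PySem.List.pyGet?_natCast] at h2
        simpa [hp] using h2
      · intro h i hi hmod
        rw [PySem.List.mem_pyRange_one] at hi
        obtain ⟨k, hk⟩ : ∃ k : ℕ, ((2 * k : ℕ) : Int) = i := ⟨i.toNat / 2, by push_cast; omega⟩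
        have hkm : k < m := by omega
        rw [← hk, PySem.List.pyGet?_natCast]
        have h3 := h k hkm
        constructor
        · intro hget; exact (by push_cast at hk ⊢; omega : ((2:Int) * k = foo) → ((2*k:ℕ):Int) = foo) ((h3.mp (by simpa [hp] using hget)))
        · intro he; simpa [hp] using h3.mpr (by push_cast at he ⊢; omega)
    by_cases hrange : 0 ≤ foo ∧ foo < (n : Int)
    · -- foo is an even in-range index: foo = 2*k0, k0 < m
      obtain ⟨k0, hk0⟩ : ∃ k0 : ℕ, (2 * (k0 : Int)) = foo := ⟨foo.toNat / 2, by omega⟩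
      have hk0m : k0 < m := by omega
      have hget : decide (PySem.Str.pyGet? ans foo = some 'A') = p k0 := by
        rw [show foo = ((2 * k0 : ℕ) : Int) by push_cast; omega, PySem.Str.pyGet?_natCast, hp, ← hs]
      simp only [if_pos hrange, hget]
      by_cases hpk0 : p k0 = true
      · have hiff : (∀ k < m, (p k = true ↔ (2 * k : Int) = foo)) ↔
            ((List.range m).countP p = 1) := by
          rw [countP_range_one m k0 p hk0m hpk0]
          constructor
          · intro h k hkm hpk
            have := (h k hkm).mp hpk
            omega
          · intro h k hkm
            constructor
            · intro hpk
              have := h k hkm hpk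
              omega
            · intro h2
              have hkk : k = k0 := by omega
              rwa [hkk]
        rw [Bool.eq_iff_iff]
        simp only [hpk0, Bool.true_and, decide_eq_true_eq, beq_iff_eq]
        rw [hA, hiff]
        omega
      · have hcond : ¬ (∀ i ∈ PySem.List.pyRange 0 (n : Int) 1, i % 2 = 0 →
            (PySem.List.pyGet? s i = some 'A' ↔ i = foo)) := by
          intro h
          exact hpk0 ((hA.mp h k0 hk0m).mpr hk0)
        have hpf : p k0 = false := by simpa using hpk0
        rw [hpf, Bool.false_and, decide_eq_false hcond]
    · -- foo is out of range: there must be no even 'A' at all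
      have hiff : (∀ k < m, (p k = true ↔ (2 * k : Int) = foo)) ↔
          ((List.range m).countP p = 0) := by
        rw [List.countP_eq_zero]
        constructor
        · intro h k hk
          rw [List.mem_range] at hk
          intro hpk
          have := (h k hk).mp hpk
          omega
        · intro h k hkm
          constructor
          · intro hpk
            exact absurd hpk (by simpa using h k (List.mem_range.mpr hkm))
          · intro h2
            exact absurd h2 (by omega)
      simp only [if_neg hrange]
      rw [Bool.eq_iff_iff]
      simp only [decide_eq_true_eq, beq_iff_eq]
      rw [hA, hiff]
      omega
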